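-- pv_equiv track=rewrite | github.com/Rafael-Leao-2024/Sistema-Cadastro-e-Gerenciamento-de-placas-v001 | grupo_andrade/placas/routes.py | pegar_pagina
-- ===== SOURCE A (Python) =====
-- def pegar_pagina(referer):
--     if not referer:
--         return '1'  # Retorna 1 se não houver Referer ou for vazio
--
--     # Verifica se há 'page=' ou 'pagina=' no URL
--     page_param = None
--     for param in ['page=', 'pagina=']:
--         if param in referer:
--             page_param = param
--             break
--
--     if not page_param:
--         return '1'  # Retorna 1 se não encontrar o parâmetro
--
--     # Pega a parte do URL depois do parâmetro
--     start_index = referer.index(page_param) + len(page_param)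
--     substring = referer[start_index:]
--
--     # Pega apenas os dígitos (número da página)
--     page_number = []
--     for char in substring:
--         if char.isdigit():
--             page_number.append(char)
--         else:
--             break  # Para no primeiro caractere não numérico
--
--     return ''.join(page_number) if page_number else '1'
-- ===== SOURCE B (Python) =====
-- import re
--
--
-- def pegar_pagina(referer):
--     if not referer:
--         return '1'
--     m = re.search(r'page=(\d*)', referer) or re.search(r'pagina=(\d*)', referer)
--     if not m:
--         return '1'
--     return m.group(1) or '1'
-- ===== Notes on version B (the rewrite author's own statement) =====
-- stated objective: idiomatic
-- what changed: Replaces A's manual param-membership scan, index arithmetic and char-by-char append-with-break digit loop with two declarative regex searches (page= tried before pagina= to keep A's preference) whose capture group is the page number.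
import Mathlib
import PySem

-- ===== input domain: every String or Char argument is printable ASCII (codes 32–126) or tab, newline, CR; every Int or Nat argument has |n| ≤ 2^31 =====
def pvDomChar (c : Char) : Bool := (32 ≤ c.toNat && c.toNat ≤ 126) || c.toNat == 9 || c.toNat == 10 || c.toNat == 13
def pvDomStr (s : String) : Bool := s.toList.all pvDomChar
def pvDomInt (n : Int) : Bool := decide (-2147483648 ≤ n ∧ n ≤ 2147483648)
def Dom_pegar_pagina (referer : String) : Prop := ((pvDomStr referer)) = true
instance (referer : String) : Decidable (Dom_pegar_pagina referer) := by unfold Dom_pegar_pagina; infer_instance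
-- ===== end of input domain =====

-- B replaces A's manual membership scan + index + char-by-char digit loop with a single
-- regex-style search helper (leftmost literal match, digit-run capture), tried for 'page='
-- then 'pagina='; objective: idiomatic (regex in Python), same cost.

-- ===== PORT A =====
-- for param in ['page=', 'pagina=']: if param in referer: page_param = param; break
def pvFindParam (referer : String) : List String → Option String
  | [] => none
  | p :: rest => if PySem.Str.isIn p referer then some p else pvFindParam referer rest

-- for char in substring: if char.isdigit(): page_number.append(char) else: break
def pvTakeDigits (acc : List Char) : List Char → List Char
  | [] => acc
  | c :: rest => if PySem.Chars.isdigit c then pvTakeDigits (acc ++ [c]) rest else acc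

def pegar_pagina (referer : String) : String :=
  if referer = "" then "1"
  else
    match pvFindParam referer ["page=", "pagina="] with
    | none => "1"
    | some page_param =>
      -- referer.index(page_param): page_param is known to occur, so index = find
      let start_index := PySem.Str.find referer page_param + PySem.Str.len page_param
      let substring := PySem.Str.slice referer (some start_index) none
      let page_number := pvTakeDigits [] substring.toList
      if page_number = [] then "1" else String.ofList page_number

-- ===== PORT B =====
-- re.search(pat ++ r'(\d*)', s): leftmost occurrence of the literal pat, capture the digit
-- run after it (exact on the ASCII domain, where \d = '0'..'9').
def pvReSearchDigits (pat : List Char) : List Char → Option (List Char)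
  | [] => if pat.isPrefixOf ([] : List Char) then some [] else none
  | c :: t =>
    if pat.isPrefixOf (c :: t) then some (((c :: t).drop pat.length).takeWhile PySem.Chars.isdigit)
    else pvReSearchDigits pat t

def pegar_pagina_alt (referer : String) : String :=
  if referer = "" then "1"
  else
    match (pvReSearchDigits "page=".toList referer.toList).orElse
          (fun _ => pvReSearchDigits "pagina=".toList referer.toList) with
    | none => "1"
    | some g => if g = [] then "1" else String.ofList g

-- ===== PRECONDITION & SPEC =====
def Spec_pegar_pagina (referer : String) (out : String) : Prop := out = pegar_pagina_alt referer
instance (referer : String) (out : String) : Decidable (Spec_pegar_pagina referer out) := by unfold Spec_pegar_pagina; infer_instance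

-- ===== CLAIM (what is proved, stated in full; the proofs are below) =====
def Claim_equal_pegar_pagina : Prop := ∀ (referer : String), Dom_pegar_pagina referer → Spec_pegar_pagina referer (pegar_pagina referer)

-- ===== LEMMAS AND PROOFS =====

-- A's append-with-break digit loop is takeWhile
theorem pvTakeDigits_eq (acc l : List Char) :
    pvTakeDigits acc l = acc ++ l.takeWhile PySem.Chars.isdigit := by
  induction l generalizing acc with
  | nil => simp [pvTakeDigits]
  | cons c t ih =>
    by_cases h : PySem.Chars.isdigit c
    · simp [pvTakeDigits, h, ih]
    · simp [pvTakeDigits, h]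

-- B's search helper, characterised by Chars.find (first occurrence)
theorem pvReSearchDigits_eq (pat s : List Char) (hpat : pat ≠ []) :
    pvReSearchDigits pat s =
      if PySem.Chars.isIn pat s then
        some ((s.drop ((PySem.Chars.find s pat).toNat + pat.length)).takeWhile PySem.Chars.isdigit)
      else none := by
  induction s with
  | nil =>
    have h1 : ¬ pat <:+: ([] : List Char) := by
      simp [List.infix_nil]; exact hpat
    simp [pvReSearchDigits, List.isPrefixOf_iff_prefix,
      (PySem.Chars.isIn_eq_false_iff pat []).2 h1, hpat]
  | cons c t ih =>
    by_cases hp : pat <+: (c :: t)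
    · have hin : PySem.Chars.isIn pat (c :: t) = true :=
        (PySem.Chars.isIn_iff_infix _ _).2 hp.isInfix
      have hnn : 0 ≤ PySem.Chars.find (c :: t) pat :=
        (PySem.Chars.find_nonneg_iff _ _).2 hp.isInfix
      obtain ⟨hocc, hmin⟩ := PySem.Chars.find_spec hnn
      have hz : (PySem.Chars.find (c :: t) pat).toNat = 0 := by
        by_contra hne
        exact hmin 0 (Nat.pos_of_ne_zero hne) (by simpa using hp)
      simp [pvReSearchDigits, List.isPrefixOf_iff_prefix, hp, hin, hz]
    · rw [show pvReSearchDigits pat (c :: t) = pvReSearchDigits pat t by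
        simp [pvReSearchDigits, List.isPrefixOf_iff_prefix, hp], ih]
      by_cases hin : PySem.Chars.isIn pat t = true
      · have hinf : pat <:+: t := (PySem.Chars.isIn_iff_infix _ _).1 hin
        have hnn : 0 ≤ PySem.Chars.find t pat := (PySem.Chars.find_nonneg_iff _ _).2 hinf
        obtain ⟨hocc, hmin⟩ := PySem.Chars.find_spec hnn
        set k := (PySem.Chars.find t pat).toNat with hk
        have hin' : PySem.Chars.isIn pat (c :: t) = true := by
          rw [← PySem.Chars.exists_prefix_drop_iff_isIn]
          exact ⟨k + 1, by simpa using hocc⟩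
        have hnn' : 0 ≤ PySem.Chars.find (c :: t) pat :=
          (PySem.Chars.find_nonneg_iff _ _).2 ((PySem.Chars.isIn_iff_infix _ _).1 hin')
        obtain ⟨hocc', hmin'⟩ := PySem.Chars.find_spec hnn'
        have heq : (PySem.Chars.find (c :: t) pat).toNat = k + 1 := by
          rcases Nat.lt_trichotomy (PySem.Chars.find (c :: t) pat).toNat (k + 1) with h | h | h
          · exfalso
            rcases Nat.eq_zero_or_pos (PySem.Chars.find (c :: t) pat).toNat with h0 | h0
            · rw [h0] at hocc'; exact hp (by simpa using hocc')
            · obtain ⟨j, hj⟩ : ∃ j, (PySem.Chars.find (c :: t) pat).toNat = j + 1 :=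
                ⟨(PySem.Chars.find (c :: t) pat).toNat - 1, by omega⟩
              rw [hj] at hocc'
              exact hmin j (by omega) (by simpa using hocc')
          · exact h
          · exact absurd (by simpa using hocc) (hmin' (k + 1) h)
        rw [if_pos hin, if_pos hin', heq,
          show k + 1 + pat.length = (k + pat.length) + 1 by omega, List.drop_succ_cons]
      · have hin' : PySem.Chars.isIn pat (c :: t) = false := by
          apply (PySem.Chars.isIn_eq_false_iff pat (c :: t)).2
          intro hinf
          obtain ⟨j, hj⟩ := (PySem.Chars.exists_prefix_drop_iff_isIn pat (c :: t)).2
            ((PySem.Chars.isIn_iff_infix pat (c :: t)).2 hinf)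
          match j with
          | 0 => exact hp (by simpa using hj)
          | j + 1 =>
            exact hin ((PySem.Chars.exists_prefix_drop_iff_isIn _ _).1 ⟨j, by simpa using hj⟩)
        simp [hin, hin']


theorem found_case (referer p : String)
    (hin : PySem.Chars.isIn p.toList referer.toList = true) :
    pvTakeDigits [] (PySem.Str.slice referer
        (some (PySem.Str.find referer p + PySem.Str.len p)) none).toList
      = (referer.toList.drop
          ((PySem.Chars.find referer.toList p.toList).toNat + p.toList.length)).takeWhile
          PySem.Chars.isdigit := by
  have hnn : 0 ≤ PySem.Chars.find referer.toList p.toList :=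
    (PySem.Chars.find_nonneg_iff _ _).2 ((PySem.Chars.isIn_iff_infix _ _).1 hin)
  rw [PySem.Str.toList_slice, PySem.Chars.slice_eq_listSlice, PySem.Str.find_eq,
    PySem.Str.len_eq,
    PySem.List.slice_from _
      (by omega : (0:Int) ≤ PySem.Chars.find referer.toList p.toList + ↑p.toList.length),
    pvTakeDigits_eq, List.nil_append]
  congr 2
  omega

theorem main_eq (referer : String) : pegar_pagina referer = pegar_pagina_alt referer := by
  by_cases h0 : referer = ""
  · simp [pegar_pagina, pegar_pagina_alt, h0]
  · simp only [pegar_pagina, pegar_pagina_alt, pvFindParam, if_neg h0, PySem.Str.isIn_eq]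
    by_cases h1 : PySem.Chars.isIn "page=".toList referer.toList = true
    · have hre := pvReSearchDigits_eq "page=".toList referer.toList (by decide)
      rw [if_pos h1] at hre
      simp only [if_pos h1, hre, found_case referer "page=" h1, Option.orElse]
    · rw [if_neg h1]
      have hre1 := pvReSearchDigits_eq "page=".toList referer.toList (by decide)
      rw [if_neg h1] at hre1
      by_cases h2 : PySem.Chars.isIn "pagina=".toList referer.toList = true
      · have hre2 := pvReSearchDigits_eq "pagina=".toList referer.toList (by decide)
        rw [if_pos h2] at hre2
        simp only [if_pos h2, hre1, hre2, found_case referer "pagina=" h2, Option.orElse]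
      · have hre2 := pvReSearchDigits_eq "pagina=".toList referer.toList (by decide)
        rw [if_neg h2] at hre2
        simp only [if_neg h2, hre1, hre2, Option.orElse]

-- ===== VERDICT (by name: the statement is the Claim_ definition above) =====
theorem pegar_pagina_spec : Claim_equal_pegar_pagina := by
  intro referer _
  unfold Spec_pegar_pagina
  exact main_eq referer
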